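-- pv_equiv track=rewrite | github.com/nparkerAuto/ProfiseeDataCleanse_P2 | HelperFunctions.py | analysis_calc_helper
-- ===== SOURCE A (Python) =====
-- def analysis_calc_helper(a1):
--
--     dash_counter=0
--     pointer=0
--     g_analysis=[]
--     fert_add_list=[]
--     fert_add=""
--     for i in range(0,len(a1)):
--         pointer=i
--         if a1[i]=='-':
--             dash_counter+=1
--             if dash_counter>2 : break
--         g_analysis.append(a1[i])
--
--     if dash_counter>2:
--         fert_add=a1[pointer+1:len(a1)]
--         fert_add_list=fert_add.split('-')
--     return "".join(g_analysis), fert_add_list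
-- ===== SOURCE B (Python) =====
-- def analysis_calc_helper(a1):
--     parts = a1.split('-')
--     if len(parts) >= 4:
--         return '-'.join(parts[:3]), parts[3:]
--     return a1, []
-- ===== Notes on version B (the rewrite author's own statement) =====
-- stated objective: simpler
-- what changed: Replaced the char-by-char scan with dash counter, pointer and break by a single str.split on the dash plus a join of the first three segments; same O(n) asymptotics but the per-character Python loop disappears.
import Mathlib
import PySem

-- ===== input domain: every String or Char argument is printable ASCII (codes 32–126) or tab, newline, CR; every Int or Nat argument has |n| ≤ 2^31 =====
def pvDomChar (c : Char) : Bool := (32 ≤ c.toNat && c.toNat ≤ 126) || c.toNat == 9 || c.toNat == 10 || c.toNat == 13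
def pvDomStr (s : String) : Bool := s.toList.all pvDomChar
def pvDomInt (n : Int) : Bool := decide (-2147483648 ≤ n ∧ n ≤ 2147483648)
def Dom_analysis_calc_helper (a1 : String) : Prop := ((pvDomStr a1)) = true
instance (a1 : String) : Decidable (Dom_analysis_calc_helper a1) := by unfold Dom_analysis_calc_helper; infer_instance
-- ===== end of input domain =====

-- B replaces A's char-by-char scan with dash counter and break by a single split('-') plus
-- '-'.join recombination (objective: simpler/idiomatic; same asymptotic cost).

-- ===== PORT A =====
-- the 'for i in range(0,len(a1))' loop with break: structural recursion over the characters,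
-- carrying the index i and the loop state (dash_counter, pointer, g_analysis) exactly as A does
def analysisLoop (cs : List Char) (i dash pointer : Nat) (g : List Char) : Nat × Nat × List Char :=
  match cs with
  | [] => (dash, pointer, g)
  | c :: rest =>
    -- pointer = i
    if c = '-' then
      if dash + 1 > 2 then (dash + 1, i, g)      -- break
      else analysisLoop rest (i + 1) (dash + 1) i (g ++ [c])
    else analysisLoop rest (i + 1) dash i (g ++ [c])

def analysis_calc_helper (a1 : String) : String × List String :=
  let st := analysisLoop a1.toList 0 0 0 []      -- (dash_counter, pointer, g_analysis)
  if st.1 > 2 then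
    let fert := PySem.Str.slice a1 (some ((st.2.1 : Int) + 1)) (some (PySem.Str.len a1))  -- a1[pointer+1:len(a1)]
    -- ''.join(g_analysis) of single chars = the string of those chars; split('-') never raises (sep ≠ "")
    (String.ofList st.2.2, (PySem.Str.split? fert "-").getD [])
  else (String.ofList st.2.2, [])

-- ===== PORT B =====
def analysis_calc_helper_alt (a1 : String) : String × List String :=
  let parts := (PySem.Str.split? a1 "-").getD []   -- a1.split('-'); sep ≠ "" so never none
  if 4 ≤ parts.length then
    (PySem.Str.join "-" (parts.take 3), parts.drop 3)
  else (a1, [])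

-- ===== PRECONDITION & SPEC =====
def Spec_analysis_calc_helper (a1 : String) (out : String × List String) : Prop := out = analysis_calc_helper_alt a1
instance (a1 : String) (out : String × List String) : Decidable (Spec_analysis_calc_helper a1 out) := by unfold Spec_analysis_calc_helper; infer_instance

-- ===== CLAIM (what is proved, stated in full; the proofs are below) =====
def Claim_equal_analysis_calc_helper : Prop := ∀ (a1 : String), Dom_analysis_calc_helper a1 → Spec_analysis_calc_helper a1 (analysis_calc_helper a1)

-- ===== LEMMAS AND PROOFS =====

-- reference splitter: pvSplit cs = cs.split('-') on the char level
def pvGlue (x : List Char) : List (List Char) → List (List Char)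
  | [] => [x]
  | p :: ps => (x ++ p) :: ps

def pvSplit : List Char → List (List Char)
  | [] => [[]]
  | c :: rest => if c = '-' then [] :: pvSplit rest else pvGlue [c] (pvSplit rest)

lemma pvGlue_ne_nil (x : List Char) (l : List (List Char)) : pvGlue x l ≠ [] := by
  cases l <;> simp [pvGlue]

lemma pvSplit_ne_nil (cs : List Char) : pvSplit cs ≠ [] := by
  cases cs with
  | nil => simp [pvSplit]
  | cons c rest =>
    simp only [pvSplit]
    split_ifs
    · simp
    · exact pvGlue_ne_nil _ _

lemma pvGlue_nil_of_ne (l : List (List Char)) (h : l ≠ []) : pvGlue [] l = l := by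
  cases l with
  | nil => exact absurd rfl h
  | cons p ps => simp [pvGlue]

lemma pvGlue_append (x y : List Char) (l : List (List Char)) :
    pvGlue (x ++ y) l = pvGlue x (pvGlue y l) := by
  cases l <;> simp [pvGlue]

lemma go_spec (fuel : Nat) (cs cur : List Char) (acc : List (List Char)) (h : cs.length < fuel) :
    PySem.Chars.splitOn.go ['-'] fuel cs cur acc = acc.reverse ++ pvGlue cur.reverse (pvSplit cs) := by
  induction fuel generalizing cs cur acc with
  | zero => omega
  | succ fuel ih =>
    cases cs with
    | nil => simp [PySem.Chars.splitOn.go, pvSplit, pvGlue]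
    | cons c rest =>
      by_cases hc : c = '-'
      · subst hc
        have hpre : List.isPrefixOf ['-'] ('-' :: rest) = true := by
          simp [List.isPrefixOf]
        simp only [PySem.Chars.splitOn.go, hpre, if_true, List.length_cons, List.length_nil,
          List.drop_succ_cons, List.drop_zero]
        rw [ih rest [] (cur.reverse :: acc) (by simpa using Nat.lt_of_succ_lt_succ h)]
        simp only [List.reverse_nil]
        rw [pvGlue_nil_of_ne _ (pvSplit_ne_nil rest)]
        simp [pvSplit, pvGlue]
      · have hpre : List.isPrefixOf ['-'] (c :: rest) = false := by
          simp only [List.isPrefixOf, Bool.and_eq_false_iff, beq_eq_false_iff_ne, ne_eq]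
          exact Or.inl fun h => hc h.symm
        simp only [PySem.Chars.splitOn.go, hpre]
        rw [ih rest (c :: cur) acc (by simpa using Nat.lt_of_succ_lt_succ h)]
        have : (c :: cur).reverse = cur.reverse ++ [c] := by simp
        rw [this, pvGlue_append]
        simp [pvSplit, hc]

lemma splitOn_eq (cs : List Char) : PySem.Chars.splitOn cs ['-'] = pvSplit cs := by
  unfold PySem.Chars.splitOn
  rw [go_spec _ _ _ _ (by omega)]
  simp [pvGlue_nil_of_ne _ (pvSplit_ne_nil cs)]

lemma split?_eq (s : String) :
    PySem.Str.split? s "-" = some ((pvSplit s.toList).map String.ofList) := by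
  have hsep : ("-" : String).toList = ['-'] := by decide
  simp [PySem.Str.split?, PySem.Chars.split?, hsep, splitOn_eq]

lemma pvSplit_length_pos (cs : List Char) : 0 < (pvSplit cs).length :=
  List.length_pos_of_ne_nil (pvSplit_ne_nil cs)

-- the loop invariant: A's scan, started with dash dashes already seen, behaves on cs
-- exactly as pvSplit cs predicts
lemma loop_spec (cs : List Char) (i dash p0 : Nat) (g : List Char) (hd : dash ≤ 2) :
    if (pvSplit cs).length + dash ≤ 3 then
      (analysisLoop cs i dash p0 g).1 = dash + ((pvSplit cs).length - 1) ∧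
      (analysisLoop cs i dash p0 g).2.2 = g ++ cs
    else
      analysisLoop cs i dash p0 g =
        (3, i + (PySem.Chars.join ['-'] ((pvSplit cs).take (3 - dash))).length,
          g ++ PySem.Chars.join ['-'] ((pvSplit cs).take (3 - dash))) ∧
      pvSplit (cs.drop ((PySem.Chars.join ['-'] ((pvSplit cs).take (3 - dash))).length + 1)) =
        (pvSplit cs).drop (3 - dash) := by
  induction cs generalizing i dash p0 g with
  | nil =>
    rw [if_pos (by simp [pvSplit]; omega)]
    simp [analysisLoop, pvSplit]
  | cons c rest ih =>
    by_cases hc : c = '-'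
    · subst hc
      have ht := pvSplit_length_pos rest
      have hs : pvSplit ('-' :: rest) = [] :: pvSplit rest := by simp [pvSplit]
      by_cases hd2 : dash = 2
      · subst hd2
        rw [if_neg (by rw [hs]; simp only [List.length_cons]; omega)]
        have hloop : analysisLoop ('-' :: rest) i 2 p0 g = (3, i, g) := by
          simp [analysisLoop]
        have htake : (pvSplit ('-' :: rest)).take (3 - 2) = [([] : List Char)] := by
          rw [hs]; rfl
        rw [htake, hloop]
        simp [PySem.Chars.join_singleton, hs]
      · have hd1 : dash ≤ 1 := by omega
        have h3 : ¬ (dash + 1 > 2) := by omega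
        have hloop : analysisLoop ('-' :: rest) i dash p0 g =
            analysisLoop rest (i + 1) (dash + 1) i (g ++ ['-']) := by
          simp only [analysisLoop, if_neg h3]
          simp
        have ihr := ih (i + 1) (dash + 1) i (g ++ ['-']) (by omega)
        by_cases hcond : (pvSplit rest).length + (dash + 1) ≤ 3
        · rw [if_pos hcond] at ihr
          rw [if_pos (by rw [hs]; simp only [List.length_cons]; omega)]
          rw [hloop, ihr.1, ihr.2, hs]
          constructor
          · simp only [List.length_cons]; omega
          · simp
        · rw [if_neg hcond] at ihr
          rw [if_neg (by rw [hs]; simp only [List.length_cons]; omega)]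
          have hk : 3 - dash = (2 - dash) + 1 := by omega
          have htl : 3 - (dash + 1) = 2 - dash := by omega
          rw [htl] at ihr
          have hqs : (pvSplit rest).take (2 - dash) ≠ [] := by
            intro hnil
            have := congrArg List.length hnil
            simp only [List.length_take, List.length_nil] at this
            omega
          obtain ⟨q, qs, hq⟩ := List.exists_cons_of_ne_nil hqs
          have hjoin : PySem.Chars.join ['-'] ((pvSplit ('-' :: rest)).take (3 - dash)) =
              '-' :: PySem.Chars.join ['-'] ((pvSplit rest).take (2 - dash)) := by
            rw [hs, hk, List.take_succ_cons, hq, PySem.Chars.join_cons_cons]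
            simp
          constructor
          · rw [hloop, ihr.1, hjoin]
            simp only [Prod.mk.injEq, List.length_cons, List.append_assoc, List.cons_append,
              List.nil_append]
            refine ⟨trivial, by omega, trivial⟩
          · rw [hjoin]
            simp only [List.length_cons, List.drop_succ_cons]
            rw [ihr.2, hs, hk, List.drop_succ_cons]
    · have ht := pvSplit_ne_nil rest
      obtain ⟨p, ps, hp⟩ := List.exists_cons_of_ne_nil ht
      have hs : pvSplit (c :: rest) = (c :: p) :: ps := by
        simp [pvSplit, hc, hp, pvGlue]
      have hloop : analysisLoop (c :: rest) i dash p0 g =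
          analysisLoop rest (i + 1) dash i (g ++ [c]) := by
        simp [analysisLoop, hc]
      have hlen : (pvSplit (c :: rest)).length = (pvSplit rest).length := by
        rw [hs, hp]; simp
      have ihr := ih (i + 1) dash i (g ++ [c]) hd
      by_cases hcond : (pvSplit rest).length + dash ≤ 3
      · rw [if_pos hcond] at ihr
        rw [if_pos (by omega)]
        rw [hloop, ihr.1, ihr.2, hlen]
        simp
      · rw [if_neg hcond] at ihr
        rw [if_neg (by omega)]
        have hk : 3 - dash = (2 - dash) + 1 := by omega
        have hjoin : PySem.Chars.join ['-'] ((pvSplit (c :: rest)).take (3 - dash)) =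
            c :: PySem.Chars.join ['-'] ((pvSplit rest).take (3 - dash)) := by
          rw [hs, hp, hk, List.take_succ_cons, List.take_succ_cons]
          cases hps : ps.take (2 - dash) with
          | nil => simp [PySem.Chars.join_singleton]
          | cons q qs => rw [PySem.Chars.join_cons_cons, PySem.Chars.join_cons_cons]; simp
        constructor
        · rw [hloop, ihr.1, hjoin]
          simp only [Prod.mk.injEq, List.length_cons, List.append_assoc, List.cons_append,
            List.nil_append]
          refine ⟨trivial, by omega, trivial⟩
        · rw [hjoin]
          simp only [List.length_cons, List.drop_succ_cons]
          rw [ihr.2, hs, hp, hk]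
          simp [List.drop_succ_cons]

lemma str_len_eq (s : String) : PySem.Str.len s = (s.toList.length : Int) := by
  simp [PySem.Str.len]

-- ===== VERDICT (by name: the statement is the Claim_ definition above) =====
theorem analysis_calc_helper_spec : Claim_equal_analysis_calc_helper := by
  intro a1 _
  unfold Spec_analysis_calc_helper analysis_calc_helper analysis_calc_helper_alt
  rw [split?_eq]
  have h := loop_spec a1.toList 0 0 0 [] (by omega)
  have hpos := pvSplit_length_pos a1.toList
  by_cases hlen : (pvSplit a1.toList).length ≤ 3
  · rw [if_pos (by omega)] at h
    obtain ⟨h1, h2⟩ := h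
    simp only [Option.getD_some]
    rw [if_neg (by omega), if_neg (by simp; omega)]
    rw [h2]
    simp
  · rw [if_neg (by omega)] at h
    obtain ⟨h1, h2⟩ := h
    simp only [Nat.sub_zero] at h1 h2
    simp only [Option.getD_some]
    rw [if_pos (by rw [h1]; omega), if_pos (by simp; omega)]
    rw [h1]
    simp only [zero_add, Prod.mk.injEq, List.nil_append]
    set pl := (PySem.Chars.join ['-'] ((pvSplit a1.toList).take 3)).length with hpl
    have hfert : (PySem.Str.slice a1 (some ((pl : Int) + 1)) (some (PySem.Str.len a1))).toList =
        a1.toList.drop (pl + 1) := by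
      rw [PySem.Str.toList_slice, str_len_eq, PySem.Chars.slice_eq_listSlice]
      have : ((pl : Int) + 1) = ((pl + 1 : Nat) : Int) := by push_cast; ring
      rw [this, PySem.List.slice_natCast]
      exact List.take_of_length_le (by simp)
    refine ⟨?_, ?_⟩
    · -- first components
      rw [PySem.Str.join]
      congr 1
      have hsep : ("-" : String).toList = ['-'] := by decide
      rw [hsep, List.map_take.symm, List.map_map]
      simp [Function.comp_def]
    · -- second components
      rw [split?_eq]
      simp only [Option.getD_some]
      rw [hfert, h2, List.map_drop]
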